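-- pv_equiv track=rewrite | github.com/Consiliency/treesitter-chunker | worktrees/text-utilities/chunker/text_processing/text_analyzer.py | _estimate_syllables
-- ===== SOURCE A (Python) =====
-- from typing import List, Dict, Any, Optional, Set, Tuple
--
-- def _estimate_syllables(words: List[str]) -> int:
--     """Estimate syllable count for readability calculation."""
--     total = 0
--     for word in words:
--         # Simple syllable estimation
--         word = word.lower()
--         count = 0
--         vowels = "aeiouy"
--         previous_was_vowel = False
--
--         for char in word:
--             is_vowel = char in vowels
--             if is_vowel and not previous_was_vowel:
--                 count += 1
--             previous_was_vowel = is_vowel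
--
--         # Adjust for silent e
--         if word.endswith('e'):
--             count -= 1
--
--         # Ensure at least 1 syllable
--         if count == 0:
--             count = 1
--
--         total += count
--
--     return total
-- ===== SOURCE B (Python) =====
-- def _estimate_syllables(words):
--     """Estimate syllables by inclusion-exclusion: vowel clusters = (#vowels) - (#adjacent vowel-vowel bigrams)."""
--     vowels = set("aeiouy")
--     total = 0
--     for word in words:
--         w = word.lower()
--         n_vowels = sum(ch in vowels for ch in w)
--         n_adjacent = sum(a in vowels and b in vowels for a, b in zip(w, w[1:]))
--         count = n_vowels - n_adjacent - (1 if w.endswith("e") else 0)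
--         total += count if count > 0 else 1
--     return total
-- ===== Notes on version B (the rewrite author's own statement) =====
-- stated objective: alternative
-- what changed: Replaced A's per-character previous-was-vowel state machine by an inclusion-exclusion computation: per word, count vowels and adjacent vowel-vowel bigrams independently and take their difference as the cluster count, then apply the silent-e decrement and floor arithmetically.
import Mathlib
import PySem

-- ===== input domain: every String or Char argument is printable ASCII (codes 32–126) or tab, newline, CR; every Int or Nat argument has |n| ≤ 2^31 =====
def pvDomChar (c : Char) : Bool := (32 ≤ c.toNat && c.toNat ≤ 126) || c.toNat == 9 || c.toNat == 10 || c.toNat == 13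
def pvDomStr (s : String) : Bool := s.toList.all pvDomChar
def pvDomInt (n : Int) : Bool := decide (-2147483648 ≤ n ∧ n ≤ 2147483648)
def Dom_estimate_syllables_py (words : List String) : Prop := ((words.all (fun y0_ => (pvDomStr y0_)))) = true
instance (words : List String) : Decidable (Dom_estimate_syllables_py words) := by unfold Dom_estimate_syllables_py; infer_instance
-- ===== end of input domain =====

-- B counts vowel clusters by inclusion-exclusion ((#vowels) - (#adjacent vowel-vowel bigrams))
-- instead of A's previous-was-vowel state machine; alternative formulation, same cost.

-- shared primitive: Python's membership test of a character in the vowel set/string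
def pvIsVowel (c : Char) : Bool := ['a', 'e', 'i', 'o', 'u', 'y'].contains c

-- ===== PORT A =====
-- one step of A's inner character loop, state (count, previous_was_vowel)
def pvStep (st : Int × Bool) (c : Char) : Int × Bool :=
  let isV := pvIsVowel c
  (if isV && !st.2 then st.1 + 1 else st.1, isV)

def pvAWord (word : String) : Int :=
  let w := PySem.Chars.lower word.toList
  let count := (w.foldl pvStep (0, false)).1
  let count := if PySem.Chars.endswith w ['e'] then count - 1 else count
  if count = 0 then 1 else count

def estimate_syllables_py (words : List String) : Int :=
  words.foldl (fun total word => total + pvAWord word) 0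

-- ===== PORT B =====
-- n_vowels = sum(ch in vowels for ch in w); n_adjacent = sum(a in vowels and b in vowels for a, b in zip(w, w[1:]))
def pvBWord (word : String) : Int :=
  let w := PySem.Chars.lower word.toList
  let nVowels : Nat := w.countP pvIsVowel
  let nAdjacent : Nat := (w.zip w.tail).countP (fun ab => pvIsVowel ab.1 && pvIsVowel ab.2)
  let count : Int := (nVowels : Int) - (nAdjacent : Int) -
    (if PySem.Chars.endswith w ['e'] then 1 else 0)
  if 0 < count then count else 1

def estimate_syllables_py_alt (words : List String) : Int :=
  words.foldl (fun total word => total + pvBWord word) 0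

-- ===== PRECONDITION & SPEC =====
def Spec_estimate_syllables_py (words : List String) (out : Int) : Prop := out = estimate_syllables_py_alt words
instance (words : List String) (out : Int) : Decidable (Spec_estimate_syllables_py words out) := by unfold Spec_estimate_syllables_py; infer_instance

-- ===== CLAIM (what is proved, stated in full; the proofs are below) =====
def Claim_equal_estimate_syllables_py : Prop := ∀ (words : List String), Dom_estimate_syllables_py words → Spec_estimate_syllables_py words (estimate_syllables_py words)

-- ===== LEMMAS AND PROOFS =====

-- recursive characterisation of A's inner loop: number of vowel-cluster starts, prev flag p
def pvClusters (p : Bool) : List Char → Nat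
  | [] => 0
  | c :: cs => (if pvIsVowel c && !p then 1 else 0) + pvClusters (pvIsVowel c) cs

theorem pvFold_eq_clusters (cs : List Char) (n : Int) (p : Bool) :
    (cs.foldl pvStep (n, p)).1 = n + pvClusters p cs := by
  induction cs generalizing n p with
  | nil => simp [pvClusters]
  | cons c cs ih =>
      simp only [List.foldl_cons, pvStep, pvClusters, ih]
      split_ifs <;> omega

-- inclusion-exclusion, generalized over the previous character x:
-- clusters after x  +  vowel-vowel bigrams of x::cs  =  vowels of cs
theorem pvInclExcl (cs : List Char) (x : Char) :
    pvClusters (pvIsVowel x) cs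
      + ((x :: cs).zip cs).countP (fun ab => pvIsVowel ab.1 && pvIsVowel ab.2)
      = cs.countP pvIsVowel := by
  induction cs generalizing x with
  | nil => simp [pvClusters]
  | cons c cs ih =>
      have h2 := ih c
      simp only [pvClusters, List.zip_cons_cons, List.countP_cons]
      cases h : pvIsVowel c <;> cases hx : pvIsVowel x <;> simp [h, hx] at h2 ⊢ <;> omega

theorem pvClusters_eq (cs : List Char) :
    pvClusters false cs
      + (cs.zip cs.tail).countP (fun ab => pvIsVowel ab.1 && pvIsVowel ab.2)
      = cs.countP pvIsVowel := by
  cases cs with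
  | nil => simp [pvClusters]
  | cons c cs =>
      have := pvInclExcl cs c
      simp only [pvClusters, List.tail_cons, List.countP_cons]
      cases h : pvIsVowel c <;> simp [h] at this ⊢ <;> omega

theorem pvClusters_pos (cs : List Char) (c : Char) (hc : pvIsVowel c = true) :
    1 ≤ pvClusters false (cs ++ [c]) := by
  induction cs with
  | nil => simp [pvClusters, hc]
  | cons y ys ih =>
      simp only [List.cons_append, pvClusters]
      cases hy : pvIsVowel y with
      | false => simpa [hy] using ih
      | true => simp [hy]

theorem pvWord_eq (word : String) : pvAWord word = pvBWord word := by
  unfold pvAWord pvBWord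
  simp only [pvFold_eq_clusters, zero_add]
  set w := PySem.Chars.lower word.toList with hw
  have key := pvClusters_eq w
  by_cases he : PySem.Chars.endswith w ['e'] = true
  · have hsuf : ['e'] <:+ w := (PySem.Chars.endswith_iff w ['e']).mp he
    obtain ⟨pre, hpre⟩ := hsuf
    have hpos : 1 ≤ pvClusters false w := by
      rw [← hpre]; exact pvClusters_pos pre 'e' (by decide)
    simp only [if_pos he]
    split_ifs <;> omega
  · simp only [if_neg he]
    split_ifs <;> omega

-- ===== VERDICT (by name: the statement is the Claim_ definition above) =====
theorem estimate_syllables_py_spec : Claim_equal_estimate_syllables_py := by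
  intro words _
  show estimate_syllables_py words = estimate_syllables_py_alt words
  unfold estimate_syllables_py estimate_syllables_py_alt
  rw [funext pvWord_eq]
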